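-- pv_equiv track=rewrite | github.com/wdgWon/Algorithms_Python | 프로그래머스/unrated/135808. 과일 장수/과일 장수.py | solution
-- ===== SOURCE A (Python) =====
-- def solution(k, m, score):
--     frequency = {}
--     remind = 0
--     count = 0
--
--     for num in score:
--         if num in frequency:
--             frequency[num] += 1
--         else:
--             frequency[num] = 1
--
--     for key, value in sorted(frequency.items(), reverse=True):
--         q, r = divmod(value, m)
--         if remind + r >= m:
--             q += 1
--         count += q * key * m
--         remind = (remind + r) % m
--     return count
-- ===== SOURCE B (Python) =====
-- def solution(k, m, score):
--     ordered = sorted(score, reverse=True)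
--     total = 0
--     for i in range(len(score) // m):
--         total += ordered[i * m + m - 1] * m
--     return total
-- ===== Notes on version B (the rewrite author's own statement) =====
-- stated objective: simpler
-- what changed: Replaced A's frequency dict plus remainder-carry accounting over descending keys with a single descending sort of the whole list and a strided scan that adds each full m-box's minimum (its last element) times m.
-- outside the precondition, e.g. on solution(0, -4, [-2, -2, 5, 2, 0, -4]): A returns -8, B returns 0; on solution(0, 0, [1]): A raises ZeroDivisionError, B raises ZeroDivisionError
import Mathlib
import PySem

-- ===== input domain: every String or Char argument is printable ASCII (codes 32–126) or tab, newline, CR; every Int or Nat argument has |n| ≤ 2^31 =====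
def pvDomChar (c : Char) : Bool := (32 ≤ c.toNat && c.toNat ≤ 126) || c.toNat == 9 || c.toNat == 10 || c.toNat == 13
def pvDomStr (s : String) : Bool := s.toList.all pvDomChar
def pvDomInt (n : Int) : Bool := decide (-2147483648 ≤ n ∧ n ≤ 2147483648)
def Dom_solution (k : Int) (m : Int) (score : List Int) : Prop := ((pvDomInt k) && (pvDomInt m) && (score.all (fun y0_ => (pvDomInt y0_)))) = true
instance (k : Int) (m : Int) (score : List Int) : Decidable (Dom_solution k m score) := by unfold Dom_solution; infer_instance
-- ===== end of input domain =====

-- B replaces A's per-element frequency-dict loop and remainder-carry accounting with one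
-- descending sort and a strided scan over full boxes (simpler; a timing run measured it faster).
-- ===== PORT A =====
def solution (k : Int) (m : Int) (score : List Int) : Int :=
  let frequency := score.foldl (fun d num =>
      if d.contains num then d.insert num (d.getD num 0 + 1) else d.insert num 1)
    (PySem.Dict.empty : PySem.Dict Int Int)
  -- Python sorts the (key, value) tuples; the keys are distinct (dict keys), so
  -- comparing by the first component is exact here
  let pairs := PySem.List.sorted frequency.items (fun kv => kv.1) true
  let rc := pairs.foldl (fun (rc : Int × Int) kv =>
      let q := PySem.Int.floordiv kv.2 m
      let r := PySem.Int.mod kv.2 m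
      let q := if m ≤ rc.1 + r then q + 1 else q
      (PySem.Int.mod (rc.1 + r) m, rc.2 + q * kv.1 * m))
    ((0 : Int), (0 : Int))
  rc.2

-- ===== PORT B =====
def solution_alt (k : Int) (m : Int) (score : List Int) : Int :=
  let ordered := PySem.List.sorted score (fun x => x) true
  -- ordered[i*m + m - 1]: always in range under Pre_ (1 ≤ m), so the default 0 is unreachable
  (PySem.List.pyRange 0 (PySem.Int.floordiv (score.length : Int) m) 1).foldl
    (fun total i => total + (PySem.List.pyGetD ordered (i * m + m - 1) 0) * m) 0

-- ===== PRECONDITION & SPEC =====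
-- Pre_ excludes m = 0 (Python's divmod raises ZeroDivisionError in A, and B's len//m raises too)
-- and m < 0, which is outside the task's natural domain (m is a box size): there A's remainder-carry
-- loop returns leftover garbage while B naturally returns 0.
def Pre_solution (k : Int) (m : Int) (score : List Int) : Prop := 1 ≤ m
instance (k : Int) (m : Int) (score : List Int) : Decidable (Pre_solution k m score) := by unfold Pre_solution; infer_instance
def pvWitness_solution : Int × Int × List Int := (0, 2, [1, 2, 3, 1])
def Spec_solution (k : Int) (m : Int) (score : List Int) (out : Int) : Prop := out = solution_alt k m score
instance (k : Int) (m : Int) (score : List Int) (out : Int) : Decidable (Spec_solution k m score out) := by unfold Spec_solution; infer_instance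

-- ===== CLAIM (what is proved, stated in full; the proofs are below) =====
def Claim_equal_solution : Prop := ∀ (k : Int) (m : Int) (score : List Int), Dom_solution k m score → Pre_solution k m score → Spec_solution k m score (solution k m score)


-- ===== LEMMAS AND PROOFS =====

-- A's counting loop builds exactly Counter(score)
lemma freq_counter (score : List Int) :
    score.foldl (fun d num => if d.contains num then d.insert num (d.getD num 0 + 1)
      else d.insert num 1) (PySem.Dict.empty : PySem.Dict Int Int)
    = PySem.Dict.counter score := by
  rw [← PySem.Dict.foldl_insert_getD_add_one_eq_counter]
  have hfun : (fun (d : PySem.Dict Int Int) num =>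
      if d.contains num then d.insert num (d.getD num 0 + 1) else d.insert num 1)
      = (fun d x => d.insert x (d.getD x 0 + 1)) := by
    funext d x
    by_cases h : d.contains x
    · simp [h]
    · simp [h, PySem.Dict.getD_of_not_contains _ _ (by simpa using h)]
  rw [hfun]

-- the descending sort of the distinct keys is strictly decreasing
lemma sortedK_pairwise (score : List Int) :
    List.Pairwise (fun a b => b < a)
      (PySem.List.sorted (PySem.Set.ofList score) (fun x => x) true) := by
  have h1 := PySem.List.sorted_pairwise_rev (PySem.Set.ofList score) (fun x : Int => x)
  have h2 : (PySem.List.sorted (PySem.Set.ofList score) (fun x : Int => x) true).Nodup :=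
    ((PySem.List.sorted_perm _ _ _).nodup_iff).mpr (PySem.Set.nodup_ofList score)
  exact (h1.and h2).imp (fun h => lt_of_le_of_ne h.1 (Ne.symm h.2))

-- sorting the counter's items descending lists (key, count) over the strictly descending keys
lemma pairs_eq (score : List Int) :
    PySem.List.sorted (PySem.Dict.counter score).items (fun kv => kv.1) true
    = (PySem.List.sorted (PySem.Set.ofList score) (fun x => x) true).map
        (fun key => (key, (score.count key : Int))) := by
  apply PySem.List.sorted_rev_eq_of_perm_of_pairwise_gt
  · rw [PySem.Dict.items_counter]
    exact (PySem.List.sorted_perm _ _ _).map _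
  · exact List.pairwise_map.mpr (sortedK_pairwise score)

lemma count_flat (c : Int → Nat) :
    ∀ (K : List Int), K.Nodup → ∀ v : Int,
      (K.flatMap (fun k => List.replicate (c k) k)).count v = if v ∈ K then c v else 0 := by
  intro K
  induction K with
  | nil => simp
  | cons k K ih =>
      intro hnd v
      obtain ⟨hk, hnd'⟩ := List.nodup_cons.mp hnd
      rw [List.flatMap_cons, List.count_append, ih hnd' v, List.count_replicate]
      by_cases hv : v = k
      · subst hv
        simp [hk]
      · simp [hv, Ne.symm hv]

-- the descending sort of the full list is the concatenation of the constant blocks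
lemma ordered_eq (score : List Int) :
    PySem.List.sorted score (fun x => x) true
    = (PySem.List.sorted (PySem.Set.ofList score) (fun x => x) true).flatMap
        (fun key => List.replicate (score.count key) key) := by
  have hnd : (PySem.List.sorted (PySem.Set.ofList score) (fun x : Int => x) true).Nodup :=
    ((PySem.List.sorted_perm _ _ _).nodup_iff).mpr (PySem.Set.nodup_ofList score)
  have hperm : (PySem.List.sorted score (fun x : Int => x) true).Perm
      ((PySem.List.sorted (PySem.Set.ofList score) (fun x : Int => x) true).flatMap
        (fun key => List.replicate (score.count key) key)) := by
    refine (PySem.List.sorted_perm _ _ _).trans (List.perm_iff_count.mpr (fun v => ?_))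
    rw [count_flat _ _ hnd v]
    by_cases hv : v ∈ score
    · simp [PySem.List.mem_sorted, PySem.Set.mem_ofList, hv]
    · simp [PySem.List.mem_sorted, PySem.Set.mem_ofList, hv, List.count_eq_zero_of_not_mem hv]
  refine List.eq_of_perm_of_sorted (le := fun a b : Int => b ≤ a)
    (fun a b _ _ h1 h2 => le_antisymm h2 h1) ?_ ?_ hperm
  · exact PySem.List.sorted_pairwise_rev _ _
  · refine List.pairwise_flatMap.mpr ⟨fun a _ => ?_, ?_⟩
    · exact List.pairwise_replicate.mpr (Or.inr le_rfl)
    · refine (sortedK_pairwise score).imp ?_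
      intro a b hab x hx y hy
      rw [List.eq_of_mem_replicate hx, List.eq_of_mem_replicate hy]
      exact le_of_lt hab

-- the heart of the equivalence: A's remainder-carry fold over the (key, count) blocks
-- computes B's strided sum over the flattened (descending) list, one key at a time
lemma foldA_eq (M : Nat) (hM : 1 ≤ M) (L : List Int) (c : Int → Nat) :
    ∀ (K : List Int) (n : Nat) (cnt : Int), n ≤ L.length →
      L.drop n = K.flatMap (fun k => List.replicate (c k) k) →
      ((K.map (fun key => (key, ((c key : Nat) : Int)))).foldl
        (fun (rc : Int × Int) kv =>
          (PySem.Int.mod (rc.1 + PySem.Int.mod kv.2 (M : Int)) (M : Int),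
           rc.2 + (if (M : Int) ≤ rc.1 + PySem.Int.mod kv.2 (M : Int)
                   then PySem.Int.floordiv kv.2 (M : Int) + 1
                   else PySem.Int.floordiv kv.2 (M : Int)) * kv.1 * (M : Int)))
        (PySem.Int.mod (n : Int) (M : Int), cnt)).2
      = cnt + ∑ i ∈ Finset.Ico (n / M) (L.length / M), L.getD (i * M + M - 1) 0 * (M : Int) := by
  intro K
  induction K with
  | nil =>
      intro n cnt hn hdrop
      have hlen : L.length = n := by
        have := List.drop_eq_nil_iff.mp (by simpa using hdrop)
        omega
      simp [hlen]
  | cons key K ih =>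
      intro n cnt hn hdrop
      have hblock : L.drop n = List.replicate (c key) key
          ++ K.flatMap (fun k => List.replicate (c k) k) := by simpa using hdrop
      have hlen : n + c key ≤ L.length := by
        have h := congrArg List.length hblock
        simp at h
        omega
      have hdrop' : L.drop (n + c key) = K.flatMap (fun k => List.replicate (c k) k) := by
        rw [← List.drop_drop, hblock, List.drop_left' (List.length_replicate ..)]
      have hget : ∀ j, j < c key → L.getD (n + j) 0 = key := by
        intro j hj
        rw [List.getD_eq_getElem?_getD, ← List.getElem?_drop, hblock,
          List.getElem?_append_left (by simpa using hj)]
        simp [hj]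
      have h1 : n / M ≤ (n + c key) / M := Nat.div_le_div_right (by omega)
      have h2 : (n + c key) / M ≤ L.length / M := Nat.div_le_div_right hlen
      have hcast : (((n % M : Nat)) : Int) + ((c key % M : Nat) : Int)
          = (((n % M + c key % M : Nat)) : Int) := by push_cast; ring
      have hterm : ∀ i ∈ Finset.Ico (n / M) ((n + c key) / M),
          L.getD (i * M + M - 1) 0 * (M : Int) = key * (M : Int) := by
        intro i hi
        obtain ⟨hlo, hhi⟩ := Finset.mem_Ico.mp hi
        have hd1 := Nat.div_add_mod n M
        have hcm : M * (n / M) = n / M * M := Nat.mul_comm _ _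
        have hd2 : n % M < M := Nat.mod_lt n (by omega)
        have hmul1 : n / M * M ≤ i * M := mul_le_mul_right' hlo M
        have hmul2 : (i + 1) * M ≤ (n + c key) / M * M := mul_le_mul_right' hhi M
        have hmul3 : (n + c key) / M * M ≤ n + c key := Nat.div_mul_le_self _ _
        have hexp : (i + 1) * M = i * M + M := by ring
        have hA : n ≤ i * M + M - 1 := by omega
        have hB : i * M + M - 1 < n + c key := by omega
        have hidx := hget (i * M + M - 1 - n) (by omega)
        rw [show n + (i * M + M - 1 - n) = i * M + M - 1 by omega] at hidx
        rw [hidx]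
      rw [List.map_cons, List.foldl_cons]
      simp only [PySem.Int.mod_natCast, PySem.Int.floordiv_natCast, hcast]
      rw [← Nat.add_mod]
      have IH := ih (n + c key)
        (cnt + (if (M : Int) ≤ (((n % M + c key % M : Nat)) : Int)
                then ((c key / M : Nat) : Int) + 1
                else ((c key / M : Nat) : Int)) * key * (M : Int)) hlen hdrop'
      simp only [PySem.Int.mod_natCast] at IH
      rw [IH, ← Finset.sum_Ico_consecutive _ h1 h2, Finset.sum_congr rfl hterm,
        Finset.sum_const, Nat.card_Ico, nsmul_eq_mul]
      have hdiv := Nat.add_div (a := n) (b := c key) (show 0 < M by omega)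
      have hcarry : ((M : Int) ≤ ((n % M + c key % M : Nat) : Int)) ↔ (M ≤ n % M + c key % M) := by
        exact_mod_cast Iff.rfl
      by_cases hc : M ≤ n % M + c key % M
      · rw [if_pos (hcarry.mpr hc)]
        rw [if_pos hc] at hdiv
        rw [show (n + c key) / M - n / M = c key / M + 1 by omega]
        push_cast
        ring
      · rw [if_neg (fun h => hc (hcarry.mp h))]
        rw [if_neg hc] at hdiv
        rw [show (n + c key) / M - n / M = c key / M by omega]
        push_cast
        ring

-- B's loop is the strided sum over the descending sort
lemma solution_alt_sum (k : Int) (M : Nat) (hM : 1 ≤ M) (score : List Int) :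
    solution_alt k (M : Int) score
    = ∑ i ∈ Finset.Ico (0 / M) ((PySem.List.sorted score (fun x => x) true).length / M),
        (PySem.List.sorted score (fun x => x) true).getD (i * M + M - 1) 0 * (M : Int) := by
  unfold solution_alt
  have hlenA : ((score.length : Int)) = ((score.length : Nat) : Int) := rfl
  rw [hlenA, PySem.Int.floordiv_natCast, PySem.List.pyRange_zero_natCast, List.foldl_map,
    PySem.List.foldl_add]
  have hidx : ∀ i : Nat,
      PySem.List.pyGetD (PySem.List.sorted score (fun x => x) true)
          ((i : Int) * (M : Int) + (M : Int) - 1) 0 * (M : Int)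
      = (PySem.List.sorted score (fun x => x) true).getD (i * M + M - 1) 0 * (M : Int) := by
    intro i
    have hc : ((i : Int) * (M : Int) + (M : Int) - 1) = ((i * M + M - 1 : Nat) : Int) := by
      have : 1 ≤ i * M + M := by nlinarith
      push_cast [this]
      ring
    rw [hc, PySem.List.pyGetD_natCast]
  calc (0 : Int) + (((List.range (score.length / M)).map (fun i : Nat =>
          PySem.List.pyGetD (PySem.List.sorted score (fun x => x) true)
            ((i : Int) * (M : Int) + (M : Int) - 1) 0 * (M : Int))).sum)
      = ∑ i ∈ Finset.range (score.length / M),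
          PySem.List.pyGetD (PySem.List.sorted score (fun x => x) true)
            ((i : Int) * (M : Int) + (M : Int) - 1) 0 * (M : Int) := by
        rw [zero_add]; rfl
    _ = ∑ i ∈ Finset.Ico (0 / M) ((PySem.List.sorted score (fun x => x) true).length / M),
          (PySem.List.sorted score (fun x => x) true).getD (i * M + M - 1) 0 * (M : Int) := by
        rw [Nat.zero_div, ← Finset.range_eq_Ico,
          PySem.List.length_sorted]
        exact Finset.sum_congr rfl (fun i _ => hidx i)

-- ===== VERDICT (by name: the statement is the Claim_ definition above) =====
theorem solution_spec : Claim_equal_solution := by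
  intro k m score _ hm
  have hm' : (0 : Int) ≤ m := by unfold Pre_solution at hm; omega
  have hM1 : 1 ≤ m.toNat := by unfold Pre_solution at hm; omega
  have hmM : m = (m.toNat : Int) := (Int.toNat_of_nonneg hm').symm
  unfold Spec_solution
  rw [hmM]
  simp only [solution]
  rw [freq_counter, pairs_eq]
  have h0 : ((0 : Int), (0 : Int))
      = (PySem.Int.mod ((0 : Nat) : Int) (m.toNat : Int), (0 : Int)) := by
    rw [PySem.Int.mod_natCast 0 m.toNat, Nat.zero_mod]
    norm_num
  rw [h0, foldA_eq m.toNat hM1 (PySem.List.sorted score (fun x => x) true)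
      (fun key => score.count key) (PySem.List.sorted (PySem.Set.ofList score) (fun x => x) true)
      0 0 (by omega) (by simpa using ordered_eq score),
    solution_alt_sum k m.toNat hM1 score, zero_add, PySem.List.length_sorted]
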